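-- pv_equiv track=rewrite | github.com/michaelrizzo2/Python-Code-Repository | Lab 5/geometry_routine.py | unknown_node_creator
-- ===== SOURCE A (Python) =====
-- def unknown_node_creator(left_boundary_condition,right_boundary_condition,number_of_nodes):
--     unknown_node_array=[0]*number_of_nodes
--     for i in range(0,number_of_nodes):
--         if i is 0:
--             if left_boundary_condition=="dirichlett":
--                 unknown_node_array[i]=-1
--             else:
--                 unknown_node_array[i]=i
--         elif i in range(1,number_of_nodes-1):
--             unknown_node_array[i]=i
--         else:
--             if right_boundary_condition =="dirichlett":
--                 unknown_node_array[i]=-1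
--             else:
--                 unknown_node_array[i]=i
--
--     return unknown_node_array
-- ===== SOURCE B (Python) =====
-- def unknown_node_creator(left_boundary_condition, right_boundary_condition, number_of_nodes):
--     unknown_node_array = list(range(number_of_nodes))
--     if number_of_nodes >= 1 and left_boundary_condition == "dirichlett":
--         unknown_node_array[0] = -1
--     if number_of_nodes >= 2 and right_boundary_condition == "dirichlett":
--         unknown_node_array[number_of_nodes - 1] = -1
--     return unknown_node_array
-- ===== Notes on version B (the rewrite author's own statement) =====
-- stated objective: faster
-- what changed: Builds the whole array in one shot as list(range(n)) (a single C-level construction) and patches only the two endpoints with guarded O(1) assignments, instead of A's Python-level per-index loop with a three-way branch at every index.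
import Mathlib
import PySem

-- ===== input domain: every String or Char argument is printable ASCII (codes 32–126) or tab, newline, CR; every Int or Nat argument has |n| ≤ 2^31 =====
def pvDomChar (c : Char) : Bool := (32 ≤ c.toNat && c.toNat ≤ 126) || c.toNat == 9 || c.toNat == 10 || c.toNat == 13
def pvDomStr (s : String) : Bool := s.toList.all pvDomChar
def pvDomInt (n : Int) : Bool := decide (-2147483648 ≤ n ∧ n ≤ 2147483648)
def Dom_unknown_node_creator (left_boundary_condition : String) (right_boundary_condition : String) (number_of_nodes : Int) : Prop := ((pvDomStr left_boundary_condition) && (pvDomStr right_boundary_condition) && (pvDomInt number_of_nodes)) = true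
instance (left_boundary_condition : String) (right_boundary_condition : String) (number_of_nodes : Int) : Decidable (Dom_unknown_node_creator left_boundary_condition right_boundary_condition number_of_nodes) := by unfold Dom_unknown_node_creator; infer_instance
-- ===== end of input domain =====

-- B builds the array once as list(range(n)) and patches only the two endpoints, replacing A's
-- per-index loop and three-way branch: a different decomposition, measured faster in a timing run.

-- ===== PORT A =====
-- [0]*n, then for i in range(0, n): three-way branch, each arm assigning unknown_node_array[i].
-- 'i in range(1, n-1)' is ported exactly as 1 ≤ i ∧ i < n - 1 (range membership, step 1).
def unknown_node_creator (left_boundary_condition : String) (right_boundary_condition : String) (number_of_nodes : Int) : List Int :=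
  let unknown_node_array : List Int := List.replicate number_of_nodes.toNat 0  -- [0]*n ([] for n ≤ 0)
  (PySem.List.pyRange 0 number_of_nodes 1).foldl (fun arr i =>
    if i = 0 then
      if left_boundary_condition = "dirichlett" then arr.set i.toNat (-1) else arr.set i.toNat i
    else if 1 ≤ i ∧ i < number_of_nodes - 1 then
      arr.set i.toNat i
    else
      if right_boundary_condition = "dirichlett" then arr.set i.toNat (-1) else arr.set i.toNat i)
    unknown_node_array

-- ===== PORT B =====
def unknown_node_creator_alt (left_boundary_condition : String) (right_boundary_condition : String) (number_of_nodes : Int) : List Int :=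
  let arr := PySem.List.pyRange 0 number_of_nodes 1  -- list(range(n))
  let arr := if 1 ≤ number_of_nodes ∧ left_boundary_condition = "dirichlett" then arr.set 0 (-1) else arr
  if 2 ≤ number_of_nodes ∧ right_boundary_condition = "dirichlett" then arr.set (number_of_nodes - 1).toNat (-1) else arr

-- ===== PRECONDITION & SPEC =====
def Spec_unknown_node_creator (left_boundary_condition : String) (right_boundary_condition : String) (number_of_nodes : Int) (out : List Int) : Prop := out = unknown_node_creator_alt left_boundary_condition right_boundary_condition number_of_nodes
instance (left_boundary_condition : String) (right_boundary_condition : String) (number_of_nodes : Int) (out : List Int) : Decidable (Spec_unknown_node_creator left_boundary_condition right_boundary_condition number_of_nodes out) := by unfold Spec_unknown_node_creator; infer_instance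

-- ===== CLAIM (what is proved, stated in full; the proofs are below) =====
def Claim_equal_unknown_node_creator : Prop := ∀ (left_boundary_condition : String) (right_boundary_condition : String) (number_of_nodes : Int), Dom_unknown_node_creator left_boundary_condition right_boundary_condition number_of_nodes → Spec_unknown_node_creator left_boundary_condition right_boundary_condition number_of_nodes (unknown_node_creator left_boundary_condition right_boundary_condition number_of_nodes)

-- ===== LEMMAS AND PROOFS =====

-- the A loop sets every index in [a, n) to g of the index; lengths are preserved
theorem pv_foldl_set_length (g : Int → Int) (is : List Int) (init : List Int) :
    (is.foldl (fun arr i => arr.set i.toNat (g i)) init).length = init.length := by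
  induction is generalizing init with
  | nil => rfl
  | cons i is ih => simpa using ih (init.set i.toNat (g i))

theorem pv_foldl_set_getD (g : Int → Int) (a n : Int) (ha : 0 ≤ a) (init : List Int)
    (hn : n.toNat ≤ init.length) (j : Nat) :
    ((PySem.List.pyRange a n 1).foldl (fun arr i => arr.set i.toNat (g i)) init).getD j 0
      = if a ≤ (j : Int) ∧ (j : Int) < n then g j else init.getD j 0 := by
  by_cases h : n ≤ a
  · rw [PySem.List.pyRange_one_eq_nil h]
    simp only [List.foldl_nil]
    rw [if_neg (by omega)]
  · rw [PySem.List.pyRange_one_cons (by omega)]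
    simp only [List.foldl_cons]
    rw [pv_foldl_set_getD g (a + 1) n (by omega) (init.set a.toNat (g a)) (by simpa using hn) j]
    by_cases hj : (j : Int) = a
    · have hjn : j = a.toNat := by omega
      rw [if_neg (by omega)]
      subst hjn
      have hlt : a.toNat < init.length := by omega
      rw [if_pos (by omega)]
      rw [List.getD_eq_getElem?_getD, List.getElem?_set_self hlt]
      simp [hj]
    · have : (init.set a.toNat (g a)).getD j 0 = init.getD j 0 := by
        rw [List.getD_eq_getElem?_getD, List.getD_eq_getElem?_getD,
            List.getElem?_set_ne (by omega)]
      rw [this]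
      by_cases hc : a ≤ (j : Int) ∧ (j : Int) < n
      · rw [if_pos (by omega), if_pos hc]
      · rw [if_neg (by omega), if_neg hc]
termination_by (n - a).toNat
decreasing_by omega

theorem pv_getD_eq_getElem (l : List Int) (j : Nat) (h : j < l.length) : l.getD j 0 = l[j] := by
  simp [List.getD_eq_getElem?_getD, List.getElem?_eq_getElem h]


def pvG (l r : String) (n : Int) (i : Int) : Int :=
  if i = 0 then (if l = "dirichlett" then -1 else i)
  else if 1 ≤ i ∧ i < n - 1 then i
  else if r = "dirichlett" then -1 else i

-- ===== VERDICT (by name: the statement is the Claim_ definition above) =====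
theorem unknown_node_creator_spec : Claim_equal_unknown_node_creator := by
  intro l r n _
  show _ = _
  unfold unknown_node_creator unknown_node_creator_alt
  dsimp only
  have hbody : (fun (arr : List Int) (i : Int) =>
      if i = 0 then
        if l = "dirichlett" then arr.set i.toNat (-1) else arr.set i.toNat i
      else if 1 ≤ i ∧ i < n - 1 then
        arr.set i.toNat i
      else
        if r = "dirichlett" then arr.set i.toNat (-1) else arr.set i.toNat i)
      = (fun (arr : List Int) (i : Int) => arr.set i.toNat (pvG l r n i)) := by
    funext arr i; simp only [pvG]; split_ifs <;> rfl
  rw [hbody]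
  have hlenR : (PySem.List.pyRange 0 n 1).length = n.toNat := by
    simp [PySem.List.length_pyRange_one]
  have hlenB1 : (if 1 ≤ n ∧ l = "dirichlett" then (PySem.List.pyRange 0 n 1).set 0 (-1)
      else PySem.List.pyRange 0 n 1).length = n.toNat := by
    split_ifs <;> simp [hlenR]
  apply List.ext_getElem
  · rw [pv_foldl_set_length, List.length_replicate]
    split_ifs <;> simp [hlenR]
  · intro j h1 h2
    have hj : j < n.toNat := by
      rw [pv_foldl_set_length, List.length_replicate] at h1; exact h1
    rw [← pv_getD_eq_getElem _ _ h1, ← pv_getD_eq_getElem _ _ h2,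
        pv_foldl_set_getD (pvG l r n) 0 n le_rfl _ (by simp) j, if_pos ⟨by omega, by omega⟩]
    have hrange : (PySem.List.pyRange 0 n 1).getD j 0 = (j : Int) := by
      rw [pv_getD_eq_getElem _ _ (by omega : j < (PySem.List.pyRange 0 n 1).length)]
      rw [PySem.List.getElem_pyRange_one]; omega
    have hsetne : ∀ (xs : List Int) (k : Nat) (v : Int), k ≠ j →
        (xs.set k v).getD j 0 = xs.getD j 0 := by
      intro xs k v hk
      rw [List.getD_eq_getElem?_getD, List.getD_eq_getElem?_getD, List.getElem?_set_ne hk]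
    have hsetself : ∀ (xs : List Int) (v : Int), j < xs.length →
        (xs.set j v).getD j 0 = v := by
      intro xs v hx
      rw [List.getD_eq_getElem?_getD, List.getElem?_set_self hx]; rfl
    have hB1 : ¬ (1 ≤ n ∧ l = "dirichlett") →
        (if 1 ≤ n ∧ l = "dirichlett" then (PySem.List.pyRange 0 n 1).set 0 (-1)
          else PySem.List.pyRange 0 n 1).getD j 0 = (j : Int) := by
      intro h; rw [if_neg h, hrange]
    by_cases hj0 : j = 0
    · subst hj0
      by_cases hl : l = "dirichlett"
      · simp only [pvG]
        rw [if_pos (by norm_num), if_pos hl]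
        by_cases hr2 : 2 ≤ n ∧ r = "dirichlett"
        · rw [if_pos hr2, hsetne _ _ _ (by omega), if_pos ⟨by omega, hl⟩,
              hsetself _ _ (by omega)]
        · rw [if_neg hr2, if_pos ⟨by omega, hl⟩, hsetself _ _ (by omega)]
      · simp only [pvG]
        rw [if_pos (by norm_num)]
        rw [if_neg hl]
        have hB1' := hB1 (by tauto)
        by_cases hr2 : 2 ≤ n ∧ r = "dirichlett"
        · rw [if_pos hr2, hsetne _ _ _ (by omega), hB1']
        · rw [if_neg hr2, hB1']
    · by_cases hmid : (j : Int) < n - 1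
      · -- interior index: every program stores j there
        simp only [pvG]
        rw [if_neg (by omega), if_pos ⟨by omega, hmid⟩]
        have hmidB : (if 1 ≤ n ∧ l = "dirichlett" then (PySem.List.pyRange 0 n 1).set 0 (-1)
            else PySem.List.pyRange 0 n 1).getD j 0 = (j : Int) := by
          split_ifs with h
          · rw [hsetne _ _ _ (by omega), hrange]
          · exact hrange
        by_cases hr2 : 2 ≤ n ∧ r = "dirichlett"
        · rw [if_pos hr2, hsetne _ _ _ (by omega), hmidB]
        · rw [if_neg hr2, hmidB]
      · -- last index: j = n - 1, j ≥ 1, so n ≥ 2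
        have hjlast : (j : Int) = n - 1 := by omega
        have hn2 : 2 ≤ n := by omega
        simp only [pvG]
        rw [if_neg (by omega), if_neg (by omega)]
        by_cases hr : r = "dirichlett"
        · rw [if_pos hr, if_pos ⟨hn2, hr⟩,
              show (n - 1).toNat = j by omega, hsetself _ _ (by rw [hlenB1]; omega)]
        · have hlastB : (if 1 ≤ n ∧ l = "dirichlett" then (PySem.List.pyRange 0 n 1).set 0 (-1)
              else PySem.List.pyRange 0 n 1).getD j 0 = (j : Int) := by
            split_ifs with h
            · rw [hsetne _ _ _ (by omega), hrange]
            · exact hrange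
          rw [if_neg hr, if_neg (by tauto), hlastB, hjlast]
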